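-- pv_equiv track=rewrite | github.com/busyweaver/temporal_nest | temporal_nest_lib.py | all_graph_neighbour
-- ===== SOURCE A (Python) =====
-- def events(g):
--     ev = set()
--     for (a,b,t) in g:
--         ev.add(t)
--     return ev
--
-- def nodes(g):
--     no = set()
--     for (a,b,t) in g:
--         no.add(a)
--         no.add(b)
--     return no
--
-- def neighbour_temp(v,t,g):
--     res = set()
--     for (a,b,tpp) in g:
--         l = [(a,b,tpp)]
--         for (a,b,tp) in l:
--             if a == v and tp >= t:
--                 res.add((b,tp))
--     return res
--
-- def reverse_neighbour_temp(v,t,g):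
--     res = set()
--     for (a,b,tpp) in g:
--         l = [(a,b,tpp)]
--         for (a,b,tp) in l:
--             if a == v and tp <= t:
--                 res.add((b,tp))
--     return res
--
-- def all_graph_neighbour(g, reverse):
--     res = dict()
--     ev = events(g)
--     for v in nodes(g):
--         for t in range(1,max(ev)+1):
--             if reverse:
--                 res[(v,t)] = reverse_neighbour_temp(v,t,g)
--             else:
--                 res[(v,t)] = neighbour_temp(v,t,g)
--     return res
-- ===== SOURCE B (Python) =====
-- def all_graph_neighbour(g, reverse):
--     # Bucket edges by source node once, then answer each (v, t) query by filtering
--     # that node's (deduplicated) bucket instead of rescanning the whole edge list.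
--     res = dict()
--     if not g:
--         return res
--     tmax = max(t for (_, _, t) in g)
--     buckets = dict()
--     seen = set()
--     node_order = set()
--     for (a, b, t) in g:
--         if (a, b, t) not in seen:
--             seen.add((a, b, t))
--             buckets.setdefault(a, []).append((b, t))
--         node_order.add(a)
--         node_order.add(b)
--     for v in node_order:
--         bucket = buckets.get(v, [])
--         for t in range(1, tmax + 1):
--             if reverse:
--                 res[(v, t)] = {(b, tp) for (b, tp) in bucket if tp <= t}
--             else:
--                 res[(v, t)] = {(b, tp) for (b, tp) in bucket if tp >= t}
--     return res
-- ===== Notes on version B (the rewrite author's own statement) =====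
-- stated objective: faster
-- what changed: B buckets the edges by source node in one pass (deduplicating repeated triples) and answers every (node, t) entry by filtering that node's own bucket, instead of A's rescan of the entire edge list for every node/timestamp pair.
import Mathlib
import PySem

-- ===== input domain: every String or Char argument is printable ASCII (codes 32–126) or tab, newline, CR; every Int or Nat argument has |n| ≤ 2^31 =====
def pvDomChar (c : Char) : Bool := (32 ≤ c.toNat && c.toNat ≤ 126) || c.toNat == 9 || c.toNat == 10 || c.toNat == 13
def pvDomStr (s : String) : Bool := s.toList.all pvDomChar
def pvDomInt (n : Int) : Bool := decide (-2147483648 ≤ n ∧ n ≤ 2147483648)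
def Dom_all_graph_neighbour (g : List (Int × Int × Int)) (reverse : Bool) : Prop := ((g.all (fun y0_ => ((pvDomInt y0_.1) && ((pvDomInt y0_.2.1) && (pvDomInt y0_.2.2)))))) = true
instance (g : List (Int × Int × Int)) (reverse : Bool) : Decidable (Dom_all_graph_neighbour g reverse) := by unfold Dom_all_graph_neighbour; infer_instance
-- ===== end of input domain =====

-- B buckets the edges by source node once (deduplicating triples) and answers every (v, t)
-- entry by filtering that node's bucket, instead of A's rescan of the whole edge list per entry.

-- ===== PORT A =====
def pvEvents (g : List (Int × Int × Int)) : PySem.Set Int :=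
  g.foldl (fun ev e => ev.add e.2.2) PySem.Set.empty

def pvNodes (g : List (Int × Int × Int)) : PySem.Set Int :=
  g.foldl (fun no e => (no.add e.1).add e.2.1) PySem.Set.empty

def pvNeighbourTemp (v t : Int) (g : List (Int × Int × Int)) : PySem.Set (Int × Int) :=
  g.foldl (fun res e =>
      [e].foldl (fun res e' =>
          if e'.1 = v ∧ t ≤ e'.2.2 then res.add (e'.2.1, e'.2.2) else res)
        res)
    PySem.Set.empty

def pvReverseNeighbourTemp (v t : Int) (g : List (Int × Int × Int)) : PySem.Set (Int × Int) :=
  g.foldl (fun res e =>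
      [e].foldl (fun res e' =>
          if e'.1 = v ∧ e'.2.2 ≤ t then res.add (e'.2.1, e'.2.2) else res)
        res)
    PySem.Set.empty

-- `max(ev)` is ported as `(max? ev id).getD 0`; the default is never consulted: the range is
-- only built while iterating over a node, hence g ≠ [] and ev ≠ [] (so max? is `some`).
def all_graph_neighbour (g : List (Int × Int × Int)) (reverse : Bool) : List (Int × Int × List (Int × Int)) :=
  let ev := pvEvents g
  let res := (pvNodes g).foldl (fun res v =>
      (PySem.List.pyRange 1 ((PySem.List.max? ev (fun x => x)).getD 0 + 1)).foldl (fun res t =>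
          if reverse then res.insert (v, t) (pvReverseNeighbourTemp v t g)
          else res.insert (v, t) (pvNeighbourTemp v t g))
        res)
    (PySem.Dict.empty : PySem.Dict (Int × Int) (PySem.Set (Int × Int)))
  res.items.map (fun p => (p.1.1, p.1.2, p.2))

-- ===== PORT B =====
-- one pass over g: (buckets, seen triple set, node insertion order)
def pvBucketStep
    (st : PySem.Dict Int (List (Int × Int)) × PySem.Set (Int × Int × Int) × PySem.Set Int)
    (e : Int × Int × Int) :
    PySem.Dict Int (List (Int × Int)) × PySem.Set (Int × Int × Int) × PySem.Set Int :=
  let bk := if st.2.1.contains e then st.1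
            else st.1.modify e.1 [] (fun l => l ++ [(e.2.1, e.2.2)])
  (bk, st.2.1.add e, (st.2.2.add e.1).add e.2.1)

-- `max(...)` over the nonempty generator is ported as `(max? ... id).getD 0`; the default is
-- never consulted (the [] case returned already).
def all_graph_neighbour_alt (g : List (Int × Int × Int)) (reverse : Bool) : List (Int × Int × List (Int × Int)) :=
  match g with
  | [] => []
  | _ :: _ =>
    let tmax := (PySem.List.max? (g.map (fun e => e.2.2)) (fun x => x)).getD 0
    let st := g.foldl pvBucketStep (PySem.Dict.empty, PySem.Set.empty, PySem.Set.empty)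
    st.2.2.foldl (fun acc v =>
        let bucket := st.1.getD v []
        acc ++ (PySem.List.pyRange 1 (tmax + 1)).map (fun t =>
          (v, t, (PySem.Set.ofList (bucket.filter
              (fun p => if reverse then p.2 ≤ t else t ≤ p.2)) : List (Int × Int)))))
      []

-- ===== PRECONDITION & SPEC =====
def Spec_all_graph_neighbour (g : List (Int × Int × Int)) (reverse : Bool) (out : List (Int × Int × List (Int × Int))) : Prop := out = all_graph_neighbour_alt g reverse
instance (g : List (Int × Int × Int)) (reverse : Bool) (out : List (Int × Int × List (Int × Int))) : Decidable (Spec_all_graph_neighbour g reverse out) := by unfold Spec_all_graph_neighbour; infer_instance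

-- ===== CLAIM (what is proved, stated in full; the proofs are below) =====
def Claim_equal_all_graph_neighbour : Prop := ∀ (g : List (Int × Int × Int)) (reverse : Bool), Dom_all_graph_neighbour g reverse → Spec_all_graph_neighbour g reverse (all_graph_neighbour g reverse)

-- ===== LEMMAS AND PROOFS =====

-- the (source-filtered) neighbour pairs of node v, in edge order, duplicates kept
def pvPairs (v : Int) (g : List (Int × Int × Int)) : List (Int × Int) :=
  (g.filter (fun e => decide (e.1 = v))).map (fun e => (e.2.1, e.2.2))

def pvPred (reverse : Bool) (t : Int) (p : Int × Int) : Bool :=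
  if reverse then decide (p.2 ≤ t) else decide (t ≤ p.2)

-- both sides reduced to this canonical form
def pvCanon (g : List (Int × Int × Int)) (reverse : Bool) (m : Int) : List (Int × Int × List (Int × Int)) :=
  (pvNodes g).flatMap (fun v =>
    (PySem.List.pyRange 1 (m + 1)).map (fun t =>
      (v, t, (PySem.Set.ofList ((pvPairs v g).filter (pvPred reverse t)) : List (Int × Int)))))

lemma pv_foldl_add_if {β α : Type} [BEq α] (p : β → Prop) [DecidablePred p] (f : β → α)
    (l : List β) (s : PySem.Set α) :
    l.foldl (fun r e => if p e then PySem.Set.add r (f e) else r) s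
      = s.update ((l.filter (fun e => decide (p e))).map f) := by
  induction l generalizing s with
  | nil => simp [PySem.Set.update]
  | cons x xs ih =>
      simp only [List.foldl_cons, List.filter_cons]
      by_cases hx : p x
      · simp only [hx, decide_true]
        rw [ih, PySem.Set.update, PySem.Set.update]
        rfl
      · simp only [hx, decide_false]
        rw [ih]
        simp

lemma pv_ofList_append_singleton {α : Type} [BEq α] (l : List α) (x : α) :
    PySem.Set.ofList (l ++ [x]) = (PySem.Set.ofList l).add x := by
  rw [PySem.Set.ofList_append]; simp [PySem.Set.update]

lemma pv_ofList_eq_self_of_nodup {α : Type} [BEq α] [LawfulBEq α] (l : List α)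
    (h : l.Nodup) : PySem.Set.ofList l = l := by
  induction l using List.reverseRecOn with
  | nil => simp
  | append_singleton xs x ih =>
      have hx : x ∉ xs := by
        intro hx
        have := List.disjoint_of_nodup_append h hx
        simp at this
      rw [pv_ofList_append_singleton, ih (List.Nodup.of_append_left h),
        PySem.Set.add_of_not_mem hx]

lemma pv_filter_ofList {α : Type} [BEq α] [LawfulBEq α] (p : α → Bool) (l : List α) :
    (PySem.Set.ofList l).filter p = PySem.Set.ofList (l.filter p) := by
  induction l using List.reverseRecOn with
  | nil => simp
  | append_singleton xs x ih =>
      rw [pv_ofList_append_singleton, List.filter_append]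
      by_cases hm : x ∈ xs
      · rw [PySem.Set.add_of_mem (by simpa [PySem.Set.mem_ofList] using hm)]
        by_cases hp : p x
        · rw [show List.filter p [x] = [x] by simp [hp], pv_ofList_append_singleton,
            PySem.Set.add_of_mem (by simp [PySem.Set.mem_ofList, List.mem_filter, hm, hp])]
          exact ih
        · rw [show List.filter p [x] = [] by simp [hp], List.append_nil]
          exact ih
      · rw [PySem.Set.add_of_not_mem (by simpa [PySem.Set.mem_ofList] using hm),
          List.filter_append]
        by_cases hp : p x
        · rw [show List.filter p [x] = [x] by simp [hp], pv_ofList_append_singleton,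
            PySem.Set.add_of_not_mem (by simp [PySem.Set.mem_ofList, List.mem_filter, hm]), ih]
        · rw [show List.filter p [x] = [] by simp [hp], List.append_nil, List.append_nil]
          exact ih

lemma pv_pairs_append (v : Int) (l : List (Int × Int × Int)) (e : Int × Int × Int) :
    pvPairs v (l ++ [e]) = pvPairs v l ++ (if e.1 = v then [(e.2.1, e.2.2)] else []) := by
  by_cases h : e.1 = v <;> simp [pvPairs, List.filter_append, h]

lemma pv_mem_pairs (v : Int) (l : List (Int × Int × Int)) (p : Int × Int) :
    p ∈ pvPairs v l ↔ (v, p.1, p.2) ∈ l := by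
  constructor
  · rintro hm
    rcases List.mem_map.mp hm with ⟨e, he, rfl⟩
    rcases List.mem_filter.mp he with ⟨he', hv⟩
    have : e.1 = v := by simpa using hv
    simpa [← this] using he'
  · intro hm
    exact List.mem_map.mpr ⟨(v, p.1, p.2), List.mem_filter.mpr ⟨hm, by simp⟩, rfl⟩

-- invariant of B's bucketing pass
lemma pv_fold_bucket (g : List (Int × Int × Int)) :
    ∀ (processed : List (Int × Int × Int)) (d : PySem.Dict Int (List (Int × Int))) (o : PySem.Set Int),
      (∀ v, d.getD v [] = PySem.Set.ofList (pvPairs v processed)) →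
      ∀ v, (g.foldl pvBucketStep (d, PySem.Set.ofList processed, o)).1.getD v []
        = PySem.Set.ofList (pvPairs v (processed ++ g)) := by
  induction g with
  | nil => intro processed d o hd v; simpa using hd v
  | cons e g ih =>
      intro processed d o hd v
      by_cases hc : e ∈ processed
      · have hstep : pvBucketStep (d, PySem.Set.ofList processed, o) e
            = (d, PySem.Set.ofList (processed ++ [e]), (o.add e.1).add e.2.1) := by
          simp [pvBucketStep, pv_ofList_append_singleton, PySem.Set.contains,
            PySem.Set.mem_ofList, hc]
        have hd' : ∀ w, d.getD w [] = PySem.Set.ofList (pvPairs w (processed ++ [e])) := by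
          intro w
          rw [pv_pairs_append]
          by_cases hw : e.1 = w
          · rw [if_pos hw, pv_ofList_append_singleton, PySem.Set.add_of_mem, hd w]
            rw [PySem.Set.mem_ofList, pv_mem_pairs]
            simpa [← hw] using hc
          · simpa [hw] using hd w
        have := ih (processed ++ [e]) d ((o.add e.1).add e.2.1) hd' v
        simp only [List.foldl_cons, hstep]
        simpa [List.append_assoc] using this
      · have hstep : pvBucketStep (d, PySem.Set.ofList processed, o) e
            = (d.modify e.1 [] (fun l => l ++ [(e.2.1, e.2.2)]),
               PySem.Set.ofList (processed ++ [e]), (o.add e.1).add e.2.1) := by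
          simp [pvBucketStep, pv_ofList_append_singleton, PySem.Set.contains,
            PySem.Set.mem_ofList, hc]
        have hd' : ∀ w, (d.modify e.1 [] (fun l => l ++ [(e.2.1, e.2.2)])).getD w []
            = PySem.Set.ofList (pvPairs w (processed ++ [e])) := by
          intro w
          rw [pv_pairs_append]
          by_cases hw : e.1 = w
          · subst hw
            rw [PySem.Dict.getD_modify_self, hd e.1, if_pos rfl,
              pv_ofList_append_singleton, PySem.Set.add_of_not_mem]
            rw [PySem.Set.mem_ofList, pv_mem_pairs]
            simpa using hc
          · rw [PySem.Dict.getD_modify_of_ne _ _ _ (fun h => hw h.symm)]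
            simpa [hw] using hd w
        have := ih (processed ++ [e]) _ ((o.add e.1).add e.2.1) hd' v
        simp only [List.foldl_cons, hstep]
        simpa [List.append_assoc] using this

-- third component of B's pass is exactly A's node set fold
lemma pv_fold_ord (g : List (Int × Int × Int)) :
    ∀ (d : PySem.Dict Int (List (Int × Int))) (s : PySem.Set (Int × Int × Int)) (o : PySem.Set Int),
      (g.foldl pvBucketStep (d, s, o)).2.2 = g.foldl (fun no e => (no.add e.1).add e.2.1) o := by
  induction g with
  | nil => intro d s o; rfl
  | cons e g ih => intro d s o; simp only [List.foldl_cons]; exact ih _ _ _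

-- second component of B's pass (needed to feed pv_fold_bucket with processed = [])
lemma pv_events_eq (g : List (Int × Int × Int)) :
    pvEvents g = PySem.Set.ofList (g.map (fun e => e.2.2)) := by
  rw [PySem.Set.ofList_eq_foldl, List.foldl_map]; rfl

lemma pv_set_nonempty {α : Type} [BEq α] [LawfulBEq α] (l : List α) (h : l ≠ []) :
    PySem.Set.ofList l ≠ [] := by
  intro hnil
  rcases List.exists_mem_of_ne_nil l h with ⟨x, hx⟩
  have := (PySem.Set.mem_ofList l x).mpr hx
  simp [hnil] at this

lemma pv_max_ofList (l : List Int) (h : l ≠ []) :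
    PySem.List.max? (PySem.Set.ofList l) (fun x => x) = PySem.List.max? l (fun x => x) := by
  obtain ⟨m, hm⟩ : ∃ m, PySem.List.max? l (fun x => x) = some m := by
    cases hml : PySem.List.max? l (fun x => x) with
    | none => exact absurd ((PySem.List.max?_eq_none_iff l _).mp hml) h
    | some m => exact ⟨m, rfl⟩
  obtain ⟨m', hm'⟩ : ∃ m', PySem.List.max? (PySem.Set.ofList l) (fun x => x) = some m' := by
    cases hml : PySem.List.max? (PySem.Set.ofList l) (fun x => x) with
    | none => exact absurd ((PySem.List.max?_eq_none_iff _ _).mp hml) (pv_set_nonempty l h)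
    | some m' => exact ⟨m', rfl⟩
  rw [hm, hm']
  have h1 : m' ∈ l := (PySem.Set.mem_ofList l m').mp (PySem.List.max?_mem hm')
  have h2 : m ∈ PySem.Set.ofList l := (PySem.Set.mem_ofList l m).mpr (PySem.List.max?_mem hm)
  have le1 : m' ≤ m := PySem.List.max?_isMax hm m' h1
  have le2 : m ≤ m' := PySem.List.max?_isMax hm' m h2
  exact congrArg some (le_antisymm le1 le2)

lemma pv_nodup_pyRange (a b : Int) : (PySem.List.pyRange a b).Nodup := by
  by_cases hab : a < b
  · rw [PySem.List.pyRange_one_cons hab]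
    refine List.Nodup.cons ?_ (pv_nodup_pyRange (a + 1) b)
    intro hmem
    have := (PySem.List.mem_pyRange_one.mp hmem).1
    omega
  · have : PySem.List.pyRange a b = [] := by
      apply List.eq_nil_iff_forall_not_mem.mpr
      intro x hx
      have := PySem.List.mem_pyRange_one.mp hx
      omega
    simp [this]
  termination_by (b - a).toNat
  decreasing_by omega

lemma pv_nodup_nodes (g : List (Int × Int × Int)) : (pvNodes g).Nodup := by
  suffices h : ∀ (s : PySem.Set Int), s.Nodup →
      (g.foldl (fun no e => (no.add e.1).add e.2.1) s).Nodup by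
    exact h PySem.Set.empty List.nodup_nil
  induction g with
  | nil => intro s hs; exact hs
  | cons e g ih =>
      intro s hs
      exact ih _ (PySem.Set.nodup_add _ _ (PySem.Set.nodup_add _ _ hs))

-- the nested insert loop over fresh distinct keys appends all its items
lemma pv_items_foldl_nested {ν : Type} (ts : List Int) (hts : ts.Nodup) (val : Int → Int → ν) :
    ∀ (vs : List Int) (d : PySem.Dict (Int × Int) ν), vs.Nodup →
      (∀ k ∈ d.keys, k.1 ∉ vs) →
      (vs.foldl (fun d v => ts.foldl (fun d t => d.insert (v, t) (val v t)) d) d).items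
        = d.items ++ vs.flatMap (fun v => ts.map (fun t => ((v, t), val v t))) := by
  intro vs
  induction vs with
  | nil => intro d _ _; simp
  | cons v vs ih =>
      intro d hnd hk
      have hfresh : ∀ t ∈ ts, d.contains (v, t) = false := by
        intro t _
        by_contra hcon
        have : d.contains (v, t) = true := by
          cases h : d.contains (v, t) <;> simp_all
        have := hk (v, t) ((PySem.Dict.contains_iff_mem_keys d (v, t)).mp this)
        simp at this
      have hinner := PySem.Dict.items_foldl_insert_fresh ts (fun t => (v, t)) (fun t => val v t)
        d hfresh (by
          refine List.Nodup.map ?_ hts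
          intro a b hab
          simpa using congrArg Prod.snd hab)
      have hkeys : (ts.foldl (fun d t => d.insert (v, t) (val v t)) d).keys
          = d.keys ++ ts.map (fun t => (v, t)) := by
        simp only [PySem.Dict.keys, hinner, List.map_append, List.map_map]
        simp [Function.comp]
      have hk' : ∀ k ∈ (ts.foldl (fun d t => d.insert (v, t) (val v t)) d).keys, k.1 ∉ vs := by
        intro k hkm
        rw [hkeys] at hkm
        rcases List.mem_append.mp hkm with hkm | hkm
        · have := hk k hkm
          simp only [List.mem_cons] at this
          exact fun hmem => this (Or.inr hmem)
        · rcases List.mem_map.mp hkm with ⟨t, _, rfl⟩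
          exact (List.nodup_cons.mp hnd).1
      have hinner' : (ts.foldl (fun d t => d.insert (v, t) (val v t)) d).items
          = d.items ++ ts.map (fun t => ((v, t), val v t)) := by
        simpa using hinner
      have := ih (ts.foldl (fun d t => d.insert (v, t) (val v t)) d)
        (List.nodup_cons.mp hnd).2 hk'
      simp only [List.foldl_cons] at *
      rw [this, hinner', List.flatMap_cons, List.append_assoc]

lemma pv_neighbour_eq (v t : Int) (g : List (Int × Int × Int)) :
    pvNeighbourTemp v t g
      = PySem.Set.ofList ((pvPairs v g).filter (pvPred false t)) := by
  have h := pv_foldl_add_if (fun e : Int × Int × Int => e.1 = v ∧ t ≤ e.2.2)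
    (fun e => (e.2.1, e.2.2)) g PySem.Set.empty
  have hA : pvNeighbourTemp v t g
      = (PySem.Set.empty : PySem.Set (Int × Int)).update
          ((g.filter (fun e => decide (e.1 = v ∧ t ≤ e.2.2))).map (fun e => (e.2.1, e.2.2))) := by
    rw [← h]; rfl
  rw [hA]
  have : (g.filter (fun e => decide (e.1 = v ∧ t ≤ e.2.2))).map (fun e => (e.2.1, e.2.2))
      = (pvPairs v g).filter (pvPred false t) := by
    simp only [pvPairs, List.filter_map, List.filter_filter]
    congr 1
    apply List.filter_congr
    intro e _
    simp [pvPred, Bool.and_comm]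
  rw [this, PySem.Set.ofList_eq_foldl]; rfl

lemma pv_reverse_neighbour_eq (v t : Int) (g : List (Int × Int × Int)) :
    pvReverseNeighbourTemp v t g
      = PySem.Set.ofList ((pvPairs v g).filter (pvPred true t)) := by
  have h := pv_foldl_add_if (fun e : Int × Int × Int => e.1 = v ∧ e.2.2 ≤ t)
    (fun e => (e.2.1, e.2.2)) g PySem.Set.empty
  have hA : pvReverseNeighbourTemp v t g
      = (PySem.Set.empty : PySem.Set (Int × Int)).update
          ((g.filter (fun e => decide (e.1 = v ∧ e.2.2 ≤ t))).map (fun e => (e.2.1, e.2.2))) := by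
    rw [← h]; rfl
  rw [hA]
  have : (g.filter (fun e => decide (e.1 = v ∧ e.2.2 ≤ t))).map (fun e => (e.2.1, e.2.2))
      = (pvPairs v g).filter (pvPred true t) := by
    simp only [pvPairs, List.filter_map, List.filter_filter]
    congr 1
    apply List.filter_congr
    intro e _
    simp [pvPred, Bool.and_comm]
  rw [this, PySem.Set.ofList_eq_foldl]; rfl

lemma pv_A_canon (g : List (Int × Int × Int)) (reverse : Bool) :
    all_graph_neighbour g reverse
      = pvCanon g reverse ((PySem.List.max? (pvEvents g) (fun x => x)).getD 0) := by
  have hins : (fun (res : PySem.Dict (Int × Int) (PySem.Set (Int × Int))) (v t : Int) =>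
      if reverse then res.insert (v, t) (pvReverseNeighbourTemp v t g)
      else res.insert (v, t) (pvNeighbourTemp v t g))
      = fun res v t => res.insert (v, t)
          (PySem.Set.ofList ((pvPairs v g).filter (pvPred reverse t))) := by
    funext res v t
    cases reverse
    · rw [if_neg Bool.false_ne_true, pv_neighbour_eq]
    · rw [if_pos rfl, pv_reverse_neighbour_eq]
  unfold all_graph_neighbour pvCanon
  have hitems := pv_items_foldl_nested (PySem.List.pyRange 1 ((PySem.List.max? (pvEvents g) (fun x => x)).getD 0 + 1))
    (pv_nodup_pyRange _ _)
    (fun v t => PySem.Set.ofList ((pvPairs v g).filter (pvPred reverse t)))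
    (pvNodes g) PySem.Dict.empty (pv_nodup_nodes g) (by intro k hk; simp [PySem.Dict.keys, PySem.Dict.empty] at hk)
  simp only [show ∀ (res : PySem.Dict (Int × Int) (PySem.Set (Int × Int))) (v t : Int),
      (if reverse then res.insert (v, t) (pvReverseNeighbourTemp v t g)
       else res.insert (v, t) (pvNeighbourTemp v t g))
      = res.insert (v, t) (PySem.Set.ofList ((pvPairs v g).filter (pvPred reverse t)))
    from fun res v t => congrFun (congrFun (congrFun hins res) v) t]
  rw [hitems]
  simp [PySem.Dict.empty, List.map_flatMap, Function.comp_def]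

lemma pv_B_canon (g : List (Int × Int × Int)) (reverse : Bool) (hg : g ≠ []) :
    all_graph_neighbour_alt g reverse
      = pvCanon g reverse ((PySem.List.max? (g.map (fun e => e.2.2)) (fun x => x)).getD 0) := by
  have halt : all_graph_neighbour_alt g reverse
      = (g.foldl pvBucketStep (PySem.Dict.empty, PySem.Set.empty, PySem.Set.empty)).2.2.foldl
          (fun acc v =>
            acc ++ (PySem.List.pyRange 1
                ((PySem.List.max? (g.map (fun e => e.2.2)) (fun x => x)).getD 0 + 1)).map (fun t =>
              (v, t, (PySem.Set.ofList
                (((g.foldl pvBucketStep (PySem.Dict.empty, PySem.Set.empty, PySem.Set.empty)).1.getD v []).filter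
                  (fun p => if reverse then p.2 ≤ t else t ≤ p.2)) : List (Int × Int)))))
          [] := by
    obtain ⟨e0, g', rfl⟩ : ∃ e0 g', g = e0 :: g' := by
      cases g with
      | nil => exact absurd rfl hg
      | cons a b => exact ⟨a, b, rfl⟩
    rfl
  have hord : (g.foldl pvBucketStep (PySem.Dict.empty, PySem.Set.empty, PySem.Set.empty)).2.2
      = pvNodes g := pv_fold_ord g _ _ _
  have hbk : ∀ v, (g.foldl pvBucketStep (PySem.Dict.empty, PySem.Set.empty, PySem.Set.empty)).1.getD v []
      = PySem.Set.ofList (pvPairs v g) := by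
    intro v
    have := pv_fold_bucket g [] PySem.Dict.empty PySem.Set.empty
      (by intro w; simp [pvPairs, PySem.Dict.getD_empty]) v
    simpa using this
  rw [halt, hord, PySem.List.foldl_append_eq_flatMap, List.nil_append]
  unfold pvCanon
  refine congrFun (congrArg List.flatMap (funext fun v => ?_)) (pvNodes g)
  refine congrFun (congrArg List.map (funext fun t => ?_)) _
  rw [hbk v]
  show (v, t, (PySem.Set.ofList ((PySem.Set.ofList (pvPairs v g)).filter (pvPred reverse t)) : List (Int × Int))) = _
  rw [pv_filter_ofList,
    pv_ofList_eq_self_of_nodup (PySem.Set.ofList ((pvPairs v g).filter (pvPred reverse t)))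
      (PySem.Set.nodup_ofList _)]

-- ===== VERDICT (by name: the statement is the Claim_ definition above) =====
theorem all_graph_neighbour_spec : Claim_equal_all_graph_neighbour := by
  intro g reverse _
  unfold Spec_all_graph_neighbour
  by_cases hg : g = []
  · subst hg; rfl
  · have hm : (PySem.List.max? (pvEvents g) (fun x => x)).getD 0
        = (PySem.List.max? (g.map (fun e => e.2.2)) (fun x => x)).getD 0 := by
      rw [pv_events_eq, pv_max_ofList _ (by simpa [List.map_eq_nil_iff] using hg)]
    rw [pv_A_canon, hm, pv_B_canon g reverse hg]
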